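-- pv_equiv track=rewrite | github.com/Sabridge22/HomeWork | HomeWorks/Glava1/ex_1_3.py | stolb
-- ===== SOURCE A (Python) =====
-- def stolb(sl: str, x: int) -> int: #функция для определения кол-ва столбцов
--     ln = len(sl)
--     pus = x - 2
--     y = 0
--     while ln > 0:
--         pus = x - 2
--         ln -= x
--         y += 1
--         if ln > 0:
--             pus2 = pus
--             while pus2 > 0:
--                 ln -=   1
--                 y += 1
--                 pus2 -= 1
--     return y
-- ===== SOURCE B (Python) =====
-- def stolb(sl: str, x: int) -> int:
--     n = len(sl)
--     if n <= 0:
--         return 0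
--     if x <= 1:
--         return n
--     b = 2 * x - 2          # characters consumed by one full block (column + gap)
--     q = (n - 1) // b       # number of full blocks before the last one
--     r = n - q * b          # characters left for the last block (1..b)
--     return q * (x - 1) + (1 if r <= x else x - 1)
-- ===== Notes on version B (the rewrite author's own statement) =====
-- stated objective: faster
-- what changed: Replaced the character-by-character double while-loop with closed-form arithmetic: number of full blocks and the remainder are computed directly by one floor division.
import Mathlib
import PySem

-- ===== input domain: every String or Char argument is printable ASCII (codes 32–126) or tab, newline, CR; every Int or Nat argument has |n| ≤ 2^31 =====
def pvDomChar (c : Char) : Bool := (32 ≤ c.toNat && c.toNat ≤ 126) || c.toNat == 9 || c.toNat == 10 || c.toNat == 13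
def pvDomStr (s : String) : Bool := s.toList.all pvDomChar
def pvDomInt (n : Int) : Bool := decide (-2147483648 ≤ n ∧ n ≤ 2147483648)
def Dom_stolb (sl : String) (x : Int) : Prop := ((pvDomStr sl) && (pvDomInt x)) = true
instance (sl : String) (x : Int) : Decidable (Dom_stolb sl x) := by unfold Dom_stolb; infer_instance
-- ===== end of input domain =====

-- B replaces A's O(len) double while-loop by O(1) closed-form block arithmetic.

-- ===== PORT A =====
-- inner 'while pus2 > 0: ln -= 1; y += 1; pus2 -= 1' run exactly k = pus2.toNat times
def stolbInner : Nat → Int → Int → Int × Int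
  | 0, ln, y => (ln, y)
  | k + 1, ln, y => stolbInner k (ln - 1) (y + 1)

-- outer 'while ln > 0' loop; fuel is an upper bound on the number of iterations
def stolbLoop : Nat → Int → Int → Int → Int
  | 0, _, _, y => y
  | fuel + 1, ln, x, y =>
    if ln > 0 then
      let ln1 := ln - x
      let y1 := y + 1
      if ln1 > 0 then
        let p := stolbInner (x - 2).toNat ln1 y1
        stolbLoop fuel p.1 x p.2
      else
        stolbLoop fuel ln1 x y1
    else y

def stolb (sl : String) (x : Int) : Int :=
  stolbLoop (sl.toList.length + 1) (PySem.Str.len sl) x 0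

-- ===== PORT B =====
def stolb_alt (sl : String) (x : Int) : Int :=
  let n : Int := PySem.Str.len sl
  if n ≤ 0 then 0
  else if x ≤ 1 then n
  else
    let b := 2 * x - 2
    let q := PySem.Int.floordiv (n - 1) b
    let r := n - q * b
    q * (x - 1) + (if r ≤ x then 1 else x - 1)

-- ===== PRECONDITION & SPEC =====
-- A's outer loop never terminates when the string is nonempty and x ≤ 0; Pre_ excludes exactly those inputs.
def Pre_stolb (sl : String) (x : Int) : Prop := sl.toList.length = 0 ∨ 1 ≤ x
instance (sl : String) (x : Int) : Decidable (Pre_stolb sl x) := by unfold Pre_stolb; infer_instance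
def pvWitness_stolb : String × Int := ("hello world", 4)

def Spec_stolb (sl : String) (x : Int) (out : Int) : Prop := out = stolb_alt sl x
instance (sl : String) (x : Int) (out : Int) : Decidable (Spec_stolb sl x out) := by unfold Spec_stolb; infer_instance

-- ===== CLAIM (what is proved, stated in full; the proofs are below) =====
def Claim_equal_stolb : Prop := ∀ (sl : String) (x : Int), Dom_stolb sl x → Pre_stolb sl x → Spec_stolb sl x (stolb sl x)

-- ===== LEMMAS AND PROOFS =====

theorem stolbInner_eq (k : Nat) (ln y : Int) :
    stolbInner k ln y = (ln - k, y + k) := by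
  induction k generalizing ln y with
  | zero => simp [stolbInner]
  | succ k ih => simp [stolbInner, ih]; constructor <;> omega

-- x = 1 : the loop removes one character per iteration
theorem stolbLoop_one (fuel : Nat) (ln y : Int) (h : ln ≤ fuel) :
    stolbLoop fuel ln 1 y = y + max ln 0 := by
  induction fuel generalizing ln y with
  | zero => simp [stolbLoop]; omega
  | succ fuel ih =>
    by_cases hln : ln > 0
    · simp only [stolbLoop, if_pos hln]
      by_cases h1 : ln - 1 > 0
      · rw [if_pos h1]
        have : (1 - 2 : Int).toNat = 0 := by decide
        rw [this]
        simp only [stolbInner]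
        rw [ih (ln - 1) (y + 1) (by omega)]
        omega
      · rw [if_neg h1, ih (ln - 1) (y + 1) (by omega)]
        omega
    · simp [stolbLoop, if_neg hln]; omega

-- closed form for x ≥ 2 (matches B's arithmetic)
theorem stolbLoop_closed (x : Int) (hx : 2 ≤ x) (fuel : Nat) (ln y : Int)
    (hpos : 0 < ln) (hf : ln ≤ fuel) :
    stolbLoop fuel ln x y =
      y + (ln - 1) / (2 * x - 2) * (x - 1) +
        (if ln - (ln - 1) / (2 * x - 2) * (2 * x - 2) ≤ x then 1 else x - 1) := by
  induction fuel generalizing ln y with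
  | zero => omega
  | succ fuel ih =>
    have hb : (0 : Int) < 2 * x - 2 := by omega
    simp only [stolbLoop, if_pos hpos]
    by_cases h1 : ln - x > 0
    · rw [if_pos h1, stolbInner_eq]
      have htn : ((x - 2).toNat : Int) = x - 2 := by omega
      simp only [htn]
      by_cases h2 : ln - x - (x - 2) > 0
      · -- a full block: recurse with ln - (2x-2)
        have hq : (ln - 1) / (2 * x - 2) = (ln - x - (x - 2) - 1) / (2 * x - 2) + 1 := by
          have := Int.add_mul_ediv_right (ln - x - (x - 2) - 1) 1 (by omega : (2 * x - 2 : Int) ≠ 0)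
          have he : ln - x - (x - 2) - 1 + 1 * (2 * x - 2) = ln - 1 := by ring
          rw [he] at this; omega
        rw [ih (ln - x - (x - 2)) (y + 1 + (x - 2)) h2 (by omega), hq]
        have : (ln - x - (x - 2) - 1) / (2 * x - 2) * (2 * x - 2) + (2 * x - 2)
            = ((ln - x - (x - 2) - 1) / (2 * x - 2) + 1) * (2 * x - 2) := by ring
        have hy : ((ln - x - (x - 2) - 1) / (2 * x - 2) + 1) * (x - 1)
            = (ln - x - (x - 2) - 1) / (2 * x - 2) * (x - 1) + (x - 1) := by ring
        split_ifs with c1 c2 c2 <;> omega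
      · -- inner loop finishes the string: ln ≤ 2x-2 and ln > x
        have hq : (ln - 1) / (2 * x - 2) = 0 :=
          Int.ediv_eq_zero_of_lt (by omega) (by omega)
        -- after the inner loop ln' = ln - (2x-2) ≤ 0, so the next check exits
        have hstop : ∀ f y', stolbLoop f (ln - x - (x - 2)) x y' = y' := by
          intro f y'
          cases f with
          | zero => rfl
          | succ f => simp [stolbLoop]; omega
        rw [hstop, hq]
        split_ifs with c <;> omega
    · -- ln ≤ x : single iteration, y + 1
      rw [if_neg h1]
      have hq : (ln - 1) / (2 * x - 2) = 0 :=
        Int.ediv_eq_zero_of_lt (by omega) (by omega)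
      have hstop : stolbLoop fuel (ln - x) x (y + 1) = y + 1 := by
        cases fuel with
        | zero => rfl
        | succ f => simp [stolbLoop]; omega
      rw [hstop, hq]
      split_ifs with c <;> omega

-- ===== VERDICT (by name: the statement is the Claim_ definition above) =====
theorem stolb_spec : Claim_equal_stolb := by
  intro sl x _ hpre
  unfold Spec_stolb stolb stolb_alt
  have hlen : PySem.Str.len sl = (sl.toList.length : Int) := PySem.Str.len_eq sl
  rw [hlen]
  rcases Nat.eq_zero_or_pos sl.toList.length with hz | hp
  · rw [hz]; simp [stolbLoop]
  · have n0 : ¬ ((sl.toList.length : Int) ≤ 0) := by omega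
    have hx1 : 1 ≤ x := by
      rcases hpre with h | h
      · omega
      · exact h
    rw [if_neg n0]
    by_cases hx : x ≤ 1
    · have hxe : x = 1 := by omega
      subst hxe
      rw [if_pos (le_refl (1:Int)), stolbLoop_one _ _ _ (by omega)]
      omega
    · rw [if_neg hx]
      have hfd : PySem.Int.floordiv ((sl.toList.length : Int) - 1) (2 * x - 2)
          = ((sl.toList.length : Int) - 1) / (2 * x - 2) :=
        PySem.Int.floordiv_eq_ediv_of_pos (by omega)
      simp only [hfd]
      rw [stolbLoop_closed x (by omega) _ _ 0 (by omega) (by omega)]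
      ring_nf
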